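-- pv_equiv track=rewrite | github.com/mschrider/PEP_Privacy_Dev_Forum_Analysis | reddit_privacy_analysis.py | dictionary_key_sum
-- ===== SOURCE A (Python) =====
-- def dictionary_key_sum(list_of_dicts: list, target_dict: dict = None) -> dict:
--     """Internally used in token frequency counting operations. Sum counts in frequency dictionaries.
--
--     :param list_of_dicts: Frequency count dictionaries
--     :param target_dict: Dictionary to use as a base for the counts
--     :return: new dictionary with updated counts
--     """
--     if target_dict is None:
--         target_dict = dict()
--     target_dict = target_dict.copy()
--
--     for dct in list_of_dicts:
--         for key, value in dct.items():
--             if key in target_dict.keys():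
--                 target_dict[key] += value
--             else:
--                 target_dict[key] = value
--
--     return target_dict
-- ===== SOURCE B (Python) =====
-- def dictionary_key_sum(list_of_dicts: list, target_dict: dict = None) -> dict:
--     """Sum counts in frequency dictionaries, column-wise: first fix the key
--     order (ordered dedup of all keys), then total each key across all sources."""
--     sources = ([] if target_dict is None else [target_dict]) + list(list_of_dicts)
--     all_keys = [key for dct in sources for key in dct]
--     order = list(dict.fromkeys(all_keys))
--     return {key: sum(dct.get(key, 0) for dct in sources) for key in order}
-- ===== Notes on version B (the rewrite author's own statement) =====
-- stated objective: alternative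
-- what changed: A threads one running accumulator dict through a nested sum-or-insert loop; B is column-wise: it first fixes the output key order by an ordered dedup of all keys, then computes each key's value independently as a sum of per-source lookups (dct.get(key, 0)) -- no accumulator dict and no membership branch.
import Mathlib
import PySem

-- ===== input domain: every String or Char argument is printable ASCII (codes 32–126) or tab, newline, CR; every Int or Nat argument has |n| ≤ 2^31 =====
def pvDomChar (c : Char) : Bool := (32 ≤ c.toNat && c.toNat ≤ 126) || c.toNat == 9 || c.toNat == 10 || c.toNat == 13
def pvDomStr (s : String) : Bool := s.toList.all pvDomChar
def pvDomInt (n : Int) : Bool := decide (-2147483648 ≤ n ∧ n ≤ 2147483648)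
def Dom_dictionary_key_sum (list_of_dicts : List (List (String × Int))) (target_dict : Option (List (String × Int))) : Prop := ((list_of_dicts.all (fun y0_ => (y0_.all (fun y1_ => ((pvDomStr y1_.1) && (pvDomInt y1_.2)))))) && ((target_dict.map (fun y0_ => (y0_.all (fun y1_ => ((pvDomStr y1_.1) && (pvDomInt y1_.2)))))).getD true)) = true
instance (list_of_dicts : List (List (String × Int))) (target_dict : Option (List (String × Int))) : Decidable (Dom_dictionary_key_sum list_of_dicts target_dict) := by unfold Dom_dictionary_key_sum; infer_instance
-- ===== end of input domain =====

-- B replaces A's single running accumulator dict (nested sum-or-insert loop) by a column-wise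
-- computation: fix the key order by an ordered dedup of all keys, then total each key
-- independently across the source dicts (objective: alternative).

-- ===== PORT A =====
def dictionary_key_sum (list_of_dicts : List (List (String × Int))) (target_dict : Option (List (String × Int))) : List (String × Int) :=
  -- 'if target_dict is None: target_dict = dict()' then 'target_dict = target_dict.copy()'
  let target : PySem.Dict String Int :=
    PySem.Dict.mk (match target_dict with | none => [] | some t => t)
  (list_of_dicts.foldl (fun acc dct =>
    dct.foldl (fun acc kv =>
      if acc.contains kv.1 then
        acc.modify kv.1 0 (· + kv.2)      -- target_dict[key] += value
      else
        acc.insert kv.1 kv.2) acc) target).items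

-- ===== PORT B =====
def dictionary_key_sum_alt (list_of_dicts : List (List (String × Int))) (target_dict : Option (List (String × Int))) : List (String × Int) :=
  let sources : List (List (String × Int)) :=
    (match target_dict with | none => [] | some t => [t]) ++ list_of_dicts
  let all_keys : List String := sources.flatMap (fun dct => dct.map Prod.fst)
  let order : List String := PySem.List.dedup all_keys     -- list(dict.fromkeys(all_keys))
  order.map (fun key =>
    (key, sources.foldl (fun s dct => s + (PySem.Dict.mk dct).getD key 0) 0))

-- ===== PRECONDITION & SPEC =====
-- Pre_ excludes association lists whose keys repeat inside one dict argument: a Python dict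
-- cannot hold duplicate keys, so such lists do not represent any Python input of A.
def Pre_dictionary_key_sum (list_of_dicts : List (List (String × Int))) (target_dict : Option (List (String × Int))) : Prop :=
  ((target_dict.getD []).map Prod.fst).Nodup ∧
  ∀ d ∈ list_of_dicts, (d.map Prod.fst).Nodup

instance (list_of_dicts : List (List (String × Int))) (target_dict : Option (List (String × Int))) : Decidable (Pre_dictionary_key_sum list_of_dicts target_dict) := by unfold Pre_dictionary_key_sum; infer_instance

def pvWitness_dictionary_key_sum : (List (List (String × Int))) × (Option (List (String × Int))) :=
  ([[("a", 2), ("b", 1)], [("a", 3)]], some [("b", 4)])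

def Spec_dictionary_key_sum (list_of_dicts : List (List (String × Int))) (target_dict : Option (List (String × Int))) (out : List (String × Int)) : Prop := out = dictionary_key_sum_alt list_of_dicts target_dict
instance (list_of_dicts : List (List (String × Int))) (target_dict : Option (List (String × Int))) (out : List (String × Int)) : Decidable (Spec_dictionary_key_sum list_of_dicts target_dict out) := by unfold Spec_dictionary_key_sum; infer_instance

-- ===== CLAIM (what is proved, stated in full; the proofs are below) =====
def Claim_equal_dictionary_key_sum : Prop := ∀ (list_of_dicts : List (List (String × Int))) (target_dict : Option (List (String × Int))), Dom_dictionary_key_sum list_of_dicts target_dict → Pre_dictionary_key_sum list_of_dicts target_dict → Spec_dictionary_key_sum list_of_dicts target_dict (dictionary_key_sum list_of_dicts target_dict)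

-- ===== LEMMAS AND PROOFS =====

-- Total of the values carried by key k in an item list (proof-only helper).
def pvSumAt (l : List (String × Int)) (k : String) : Int :=
  ((l.filter (fun p => p.1 == k)).map Prod.snd).sum

theorem pvSumAt_append (l₁ l₂ : List (String × Int)) (k : String) :
    pvSumAt (l₁ ++ l₂) k = pvSumAt l₁ k + pvSumAt l₂ k := by
  simp [pvSumAt]

theorem pvSumAt_eq_zero_of_not_mem (l : List (String × Int)) (k : String)
    (h : k ∉ l.map Prod.fst) : pvSumAt l k = 0 := by
  induction l with
  | nil => rfl
  | cons p t ih =>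
    simp only [List.map_cons, List.mem_cons, not_or] at h
    simp [pvSumAt, show (p.1 == k) = false by
      simp [beq_eq_false_iff_ne]; exact fun e => h.1 e.symm]
    exact ih h.2

-- A's inner step (membership test, then add-or-insert) equals insert-with-defaulted-sum.
theorem pv_step_eq (d : PySem.Dict String Int) (k : String) (v : Int) :
    (if d.contains k then d.modify k 0 (· + v) else d.insert k v)
      = d.insert k (d.getD k 0 + v) := by
  by_cases h : d.contains k = true
  · simp [h]
    rfl
  · simp at h
    rw [if_neg (by simp [h]), PySem.Dict.getD_of_not_contains d 0 h, zero_add]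

-- Replaying an association list with Nodup, fresh keys through the accumulation step appends it.
theorem pv_replay (l : List (String × Int)) (d : PySem.Dict String Int)
    (hfresh : ∀ p ∈ l, d.contains p.1 = false) (hnd : (l.map Prod.fst).Nodup) :
    l.foldl (fun r kv => r.insert kv.1 (r.getD kv.1 0 + kv.2)) d
      = PySem.Dict.mk (d.items ++ l) := by
  induction l generalizing d with
  | nil => apply PySem.Dict.ext; simp
  | cons p t ih =>
    obtain ⟨k, v⟩ := p
    have hk : d.contains k = false := hfresh (k, v) (by simp)
    have hstep : d.insert k (d.getD k 0 + v) = PySem.Dict.mk (d.items ++ [(k, v)]) := by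
      apply PySem.Dict.ext
      rw [PySem.Dict.getD_of_not_contains d 0 hk]
      simp [PySem.Dict.items_insert_of_not_contains d v hk]
    simp only [List.foldl_cons, hstep]
    rw [ih]
    · simp
    · intro q hq
      have hqk : q.1 ≠ k := by
        simp only [List.map_cons, List.nodup_cons] at hnd
        intro hEq
        exact hnd.1 (hEq ▸ (List.mem_map_of_mem hq))
      have := hfresh q (by simp [hq])
      rw [PySem.Dict.contains_eq_decide_mem_keys] at this
      simp only [PySem.Dict.keys, List.mem_map, decide_eq_false_iff_not] at this
      rw [PySem.Dict.contains_mk]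
      simp only [List.any_append, List.any_cons, List.any_nil, Bool.or_eq_false_iff,
        List.any_eq_false]
      refine ⟨fun p hp hEq => this ⟨p, hp, eq_of_beq hEq⟩, ?_, trivial⟩
      simp [beq_eq_false_iff_ne]; exact fun hEq => hqk hEq.symm
    · simp only [List.map_cons, List.nodup_cons] at hnd
      exact hnd.2

-- getD through the accumulation fold: base value plus the key's total in the replayed list.
theorem pv_getD_fold (l : List (String × Int)) (d : PySem.Dict String Int) (k : String) :
    (l.foldl (fun r kv => r.insert kv.1 (r.getD kv.1 0 + kv.2)) d).getD k 0
      = d.getD k 0 + pvSumAt l k := by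
  induction l generalizing d with
  | nil => simp [pvSumAt]
  | cons p t ih =>
    simp only [List.foldl_cons]
    rw [ih]
    by_cases h : k = p.1
    · subst h
      simp [PySem.Dict.getD_insert_self, pvSumAt]
      ring
    · rw [PySem.Dict.getD_insert_of_ne d _ _ h]
      simp [pvSumAt, show (p.1 == k) = false by
        simp [beq_eq_false_iff_ne]; exact fun e => h e.symm]

-- Lookup in a Nodup-key literal dict is that key's total in the list.
theorem pv_getD_mk (dct : List (String × Int)) (k : String)
    (hnd : (dct.map Prod.fst).Nodup) :
    (PySem.Dict.mk dct).getD k 0 = pvSumAt dct k := by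
  induction dct with
  | nil => rfl
  | cons p t ih =>
    simp only [List.map_cons, List.nodup_cons] at hnd
    rw [PySem.Dict.getD_eq_get?_getD, PySem.Dict.get?_mk_cons]
    by_cases h : p.1 = k
    · rw [if_pos (by simp [h])]
      have hz : pvSumAt t k = 0 :=
        pvSumAt_eq_zero_of_not_mem t k (fun hm => hnd.1 (h ▸ hm))
      simp only [pvSumAt] at hz
      simp [pvSumAt, show (p.1 == k) = true by simp [h], hz]
    · rw [if_neg (by simp [h]), ← PySem.Dict.getD_eq_get?_getD]
      rw [ih hnd.2]
      simp [pvSumAt, show (p.1 == k) = false by simp [h]]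

-- Folding the nested loops equals folding over the concatenation of all item lists.
theorem pv_nested_eq_flat {α : Type} (g : α → String × Int → α)
    (srcs : List (List (String × Int))) (init : α) :
    srcs.foldl (fun acc dct => dct.foldl g acc) init
      = (srcs.flatMap id).foldl g init := by
  induction srcs generalizing init with
  | nil => rfl
  | cons d t ih =>
    simp only [List.foldl_cons, List.flatMap_cons, id, List.foldl_append]
    exact ih _

-- B's per-key column sum over the sources is the key's total in the concatenated items.
theorem pv_colsum (srcs : List (List (String × Int))) (k : String)
    (hndAll : ∀ d ∈ srcs, (d.map Prod.fst).Nodup) :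
    srcs.foldl (fun s dct => s + (PySem.Dict.mk dct).getD k 0) 0
      = pvSumAt (srcs.flatMap id) k := by
  induction srcs with
  | nil => rfl
  | cons d t ih =>
    have hd : (PySem.Dict.mk d).getD k 0 = pvSumAt d k :=
      pv_getD_mk d k (hndAll d (by simp))
    have ih' := ih (fun d hd => hndAll d (by simp [hd]))
    rw [PySem.List.foldl_add] at ih' ⊢
    simp only [zero_add] at ih'
    simp only [List.flatMap_cons, id, pvSumAt_append, List.map_cons, List.sum_cons,
      zero_add, hd, ih']

-- The heart of the equivalence, stated over the unified source list: A's accumulator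
-- fold from the empty dict equals B's column-wise map, when every source has Nodup keys.
theorem pv_main (srcs : List (List (String × Int)))
    (hndAll : ∀ d ∈ srcs, (d.map Prod.fst).Nodup) :
    (srcs.foldl (fun acc dct =>
        dct.foldl (fun r kv => r.insert kv.1 (r.getD kv.1 0 + kv.2)) acc) PySem.Dict.empty).items
      = (PySem.List.dedup (srcs.flatMap (fun dct => dct.map Prod.fst))).map (fun key =>
          (key, srcs.foldl (fun s dct => s + (PySem.Dict.mk dct).getD key 0) 0)) := by
  set L : List (String × Int) := srcs.flatMap id with hL
  rw [pv_nested_eq_flat, ← hL]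
  set D : PySem.Dict String Int :=
    L.foldl (fun r kv => r.insert kv.1 (r.getD kv.1 0 + kv.2)) PySem.Dict.empty with hD
  have hkeys : D.keys = PySem.Set.ofList (L.map Prod.fst) := by
    rw [hD, PySem.Dict.keys_foldl_insert_key (key := Prod.fst)
      (f := fun r kv => r.getD kv.1 0 + kv.2)]
    simp [PySem.Set.update_nil_left, PySem.Dict.keys_empty]
  have hndk : D.keys.Nodup := by
    rw [hkeys]; exact PySem.Set.nodup_ofList _
  rw [PySem.Dict.items_eq_map_keys D hndk 0, hkeys]
  have hkeysB : PySem.List.dedup (srcs.flatMap fun dct => dct.map Prod.fst)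
      = PySem.Set.ofList (L.map Prod.fst) := by
    rw [PySem.List.dedup_eq_ofList, hL, List.map_flatMap]
    rfl
  rw [hkeysB]
  apply List.map_congr_left
  intro k _
  have hget : D.getD k 0 = pvSumAt L k := by
    rw [hD, pv_getD_fold]
    simp [PySem.Dict.getD_empty]
  rw [hget, hL, pv_colsum srcs k hndAll]

-- ===== VERDICT (by name: the statement is the Claim_ definition above) =====
theorem dictionary_key_sum_spec : Claim_equal_dictionary_key_sum := by
  intro lds td _hDom hPre
  unfold Spec_dictionary_key_sum dictionary_key_sum dictionary_key_sum_alt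
  have hstep : (fun (acc : PySem.Dict String Int) (kv : String × Int) =>
      if acc.contains kv.1 then acc.modify kv.1 0 (· + kv.2) else acc.insert kv.1 kv.2)
      = fun acc kv => acc.insert kv.1 (acc.getD kv.1 0 + kv.2) := by
    funext acc kv
    exact pv_step_eq acc kv.1 kv.2
  simp only [hstep]
  cases td with
  | none =>
    exact pv_main lds hPre.2
  | some t =>
    have htgt : PySem.Dict.mk t
        = t.foldl (fun r kv => r.insert kv.1 (r.getD kv.1 0 + kv.2)) PySem.Dict.empty := by
      rw [pv_replay t PySem.Dict.empty (by intro p _; rfl) hPre.1]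
      rfl
    have hnd : ∀ d ∈ ([t] ++ lds), (d.map Prod.fst).Nodup := by
      intro d hd
      rcases List.mem_append.mp hd with h | h
      · simp only [List.mem_singleton] at h; subst h; exact hPre.1
      · exact hPre.2 d h
    have := pv_main ([t] ++ lds) hnd
    simp only [List.foldl_cons, List.cons_append, List.nil_append] at this ⊢
    rw [← htgt] at this
    exact this
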